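-- pv_equiv track=rewrite | github.com/TornikeMzhavia/PythonSolvers | LearningPython/Longest Word.py | GetMaxChains
-- ===== SOURCE A (Python) =====
-- def GetMaxChains(words):
--     chain = []
--     maxChainLength = 1
--
--     for word in words:
--         wordsCopy = words[:]
--
--         chain.append(word)
--         lastChar = word[-1]
--         wordsCopy.remove(word)
--
--         while(len(wordsCopy) > 0):
--             nextWord = ''
--
--             for candidate in wordsCopy:
--                 if(candidate[0] == lastChar):
--                     nextWord = candidate
--                     break
--
--             if(nextWord == ''):
--                 break
--
--             chain.append(nextWord)
--             lastChar = nextWord[-1]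
--             wordsCopy.remove(nextWord)
--
--         if(len(chain) > maxChainLength):
--             maxChainLength = len(chain)
--         chain = []
--
--     return maxChainLength
-- ===== SOURCE B (Python) =====
-- def GetMaxChains(words):
--     # Bucket words by first character once; each greedy chain then consumes the
--     # front of per-character queues (a cursor per character), so one start costs
--     # O(n) instead of A's O(n^2) rescans: O(n^2) total vs A's O(n^3).
--     buckets = {}
--     for w in words:
--         buckets.setdefault(w[0], []).append(w)
--     best = 1
--     for w in words:
--         rem = {c: lst[:] for c, lst in buckets.items()}
--         rem[w[0]].remove(w)
--         pos = {}
--         last = w[-1]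
--         length = 1
--         while pos.get(last, 0) < len(rem.get(last, [])):
--             k = pos.get(last, 0)
--             nxt = rem[last][k]
--             pos[last] = k + 1
--             length += 1
--             last = nxt[-1]
--         if length > best:
--             best = length
--     return best
-- ===== Notes on version B (the rewrite author's own statement) =====
-- stated objective: faster
-- what changed: B indexes the words once into per-first-character queues and runs each greedy chain by advancing a cursor per character, replacing A's repeated linear scans and list removals over a fresh copy of the list.
import Mathlib
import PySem

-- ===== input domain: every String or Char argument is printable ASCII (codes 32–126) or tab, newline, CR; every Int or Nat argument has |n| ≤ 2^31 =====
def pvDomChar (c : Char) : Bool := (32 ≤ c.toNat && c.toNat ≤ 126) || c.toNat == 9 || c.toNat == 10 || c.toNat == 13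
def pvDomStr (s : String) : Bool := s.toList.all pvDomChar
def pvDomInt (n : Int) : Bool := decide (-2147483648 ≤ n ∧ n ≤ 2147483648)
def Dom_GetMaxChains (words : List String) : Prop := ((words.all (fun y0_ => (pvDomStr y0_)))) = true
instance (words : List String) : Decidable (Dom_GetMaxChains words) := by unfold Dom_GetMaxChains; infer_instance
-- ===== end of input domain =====

-- B replaces A's per-step linear rescans of a shrinking copy of the list by per-first-character
-- queues consumed via a cursor per character (objective: faster, one chain costs O(n) not O(n^2)).

-- ===== PORT A =====
-- `w[0]` / `w[-1]`; exact for nonempty strings (Pre_ excludes "").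
def pvHead (w : String) : Char := w.toList.headD ' '
def pvLast (w : String) : Char := w.toList.getLastD ' '

-- A's inner `for candidate in wordsCopy: if candidate[0] == lastChar: … break`,
-- with `none` for the `nextWord == ''` sentinel (Pre_ excludes "").
def pvFindNext (c : Char) : List String → Option String
  | [] => none
  | w :: ws => if pvHead w = c then some w else pvFindNext c ws

-- A's `while len(wordsCopy) > 0` loop carrying `chain`; fuel bounds the iterations
-- (each one removes an element, so `words.length` fuel is never exhausted).
def pvChainA : Nat → Char → List String → List String → List String
  | 0, _, _, chain => chain
  | fuel+1, c, ws, chain =>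
    if ws.length > 0 then
      match pvFindNext c ws with
      | none => chain
      | some nw => pvChainA fuel (pvLast nw) ((PySem.List.remove? ws nw).getD ws) (chain ++ [nw])
    else chain

def GetMaxChains (words : List String) : Int :=
  words.foldl (fun best w =>
    let chain := pvChainA words.length (pvLast w) ((PySem.List.remove? words w).getD words) [w]
    if (chain.length : Int) > best then (chain.length : Int) else best) 1

-- ===== PORT B =====
-- `buckets.setdefault(w[0], []).append(w)`
def pvBuckets (words : List String) : PySem.Dict Char (List String) :=
  words.foldl (fun d w => d.modify (pvHead w) [] (· ++ [w])) PySem.Dict.empty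

-- B's `while pos.get(last,0) < len(rem.get(last,[]))` cursor loop (fuel = words.length,
-- never exhausted: every iteration advances a cursor past a distinct element).
def pvChainB : Nat → Char → PySem.Dict Char (List String) → PySem.Dict Char Int → Int → Int
  | 0, _, _, _, len => len
  | fuel+1, c, rem, pos, len =>
    let k := pos.getD c 0
    let q := rem.getD c []
    if k < (q.length : Int) then
      let nxt := PySem.List.pyGetD q k ""
      pvChainB fuel (pvLast nxt) rem (pos.insert c (k + 1)) (len + 1)
    else len

def GetMaxChains_alt (words : List String) : Int :=
  let buckets := pvBuckets words
  words.foldl (fun best w =>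
    -- Python copies each bucket (`lst[:]`) then mutates one with `.remove(w)`;
    -- with immutable lists the copy is `buckets` itself and the mutation is an insert.
    let rem := buckets.insert (pvHead w)
      ((PySem.List.remove? (buckets.getD (pvHead w) []) w).getD [])
    let len := pvChainB words.length (pvLast w) rem PySem.Dict.empty 1
    if len > best then len else best) 1

-- ===== PRECONDITION & SPEC =====
-- Pre_ excludes lists containing the empty string "", on which Python A raises IndexError
-- at word[-1] / candidate[0] (B raises there too).
def Pre_GetMaxChains (words : List String) : Prop := "" ∉ words
instance (words : List String) : Decidable (Pre_GetMaxChains words) := by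
  unfold Pre_GetMaxChains; infer_instance
def pvWitness_GetMaxChains : List String := ["ab", "ba", "ac"]

def Spec_GetMaxChains (words : List String) (out : Int) : Prop := out = GetMaxChains_alt words
instance (words : List String) (out : Int) : Decidable (Spec_GetMaxChains words out) := by unfold Spec_GetMaxChains; infer_instance

-- ===== CLAIM (what is proved, stated in full; the proofs are below) =====
def Claim_equal_GetMaxChains : Prop := ∀ (words : List String), Dom_GetMaxChains words → Pre_GetMaxChains words → Spec_GetMaxChains words (GetMaxChains words)

-- ===== LEMMAS AND PROOFS =====

-- A's scan finds the first remaining word starting with c.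
theorem pvFindNext_eq_head_filter (c : Char) (ws : List String) :
    pvFindNext c ws = (ws.filter (fun w => pvHead w == c)).head? := by
  induction ws with
  | nil => rfl
  | cons x t ih =>
    by_cases h : pvHead x = c <;> simp [pvFindNext, h, ih]

-- Removing (by value) the first word starting with c drops exactly the head of the c-filter
-- and leaves every other first-character filter unchanged.
theorem pvRemove_head_filter (c : Char) (ws : List String) (nw : String) (rest : List String)
    (h : ws.filter (fun w => pvHead w == c) = nw :: rest) :
    ∃ ws', PySem.List.remove? ws nw = some ws' ∧
      (∀ c', ws'.filter (fun w => pvHead w == c') =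
        if c' = c then rest else ws.filter (fun w => pvHead w == c')) := by
  induction ws generalizing nw rest with
  | nil => simp at h
  | cons x t ih =>
    by_cases hx : pvHead x = c
    · rw [List.filter_cons_of_pos (by simp [hx])] at h
      obtain ⟨rfl, rfl⟩ : x = nw ∧ t.filter (fun w => pvHead w == c) = rest := by
        simpa using h
      refine ⟨t, by simp [PySem.List.remove?_cons_self], fun c' => ?_⟩
      by_cases hc : c' = c
      · simp [hc]
      · simp [hc, show (pvHead x == c') = false by simp [hx, Ne.symm hc]]
    · rw [List.filter_cons_of_neg (by simp [hx])] at h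
      obtain ⟨t', ht', hf⟩ := ih _ _ h
      have hnwc : pvHead nw = c := by
        have : nw ∈ t.filter (fun w => pvHead w == c) := by rw [h]; exact List.mem_cons_self
        simpa using (List.of_mem_filter this)
      have hxnw : x ≠ nw := fun hxe => hx (hxe ▸ hnwc)
      refine ⟨x :: t', ?_, fun c' => ?_⟩
      · rw [PySem.List.remove?_cons_of_ne t hxnw, ht']; rfl
      · by_cases hc : c' = c
        · subst hc
          rw [List.filter_cons_of_neg (by simp [hx]), List.filter_cons_of_neg (by simp [hx])]
          simpa using hf c'
        · have := hf c'
          simp only [hc, if_false] at this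
          simp [List.filter_cons, this, hc]

-- simulation: A's chain loop on the remaining list equals B's cursor loop, under the
-- invariant that each character's queue-from-cursor is exactly the c-filter of the list.
theorem pvChain_sim (fuel : Nat) (c : Char) (ws : List String) (chain : List String)
    (rem : PySem.Dict Char (List String)) (pos : PySem.Dict Char Int)
    (hpos : ∀ c', 0 ≤ pos.getD c' 0)
    (hinv : ∀ c', (rem.getD c' []).drop (pos.getD c' 0).toNat
        = ws.filter (fun w => pvHead w == c')) :
    ((pvChainA fuel c ws chain).length : Int) = pvChainB fuel c rem pos (chain.length : Int) := by
  induction fuel generalizing c ws chain pos with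
  | zero => simp [pvChainA, pvChainB]
  | succ n ih =>
    have hk := hpos c
    have hdrop := hinv c
    cases hq : ws.filter (fun w => pvHead w == c) with
    | nil =>
      rw [hq] at hdrop
      have hlen : (rem.getD c []).length ≤ (pos.getD c 0).toNat :=
        List.drop_eq_nil_iff.mp hdrop
      have hcond : ¬ (pos.getD c 0 < ((rem.getD c []).length : Int)) := by omega
      have hfa : pvFindNext c ws = none := by rw [pvFindNext_eq_head_filter, hq]; rfl
      simp only [pvChainA, pvChainB, hfa, hcond, if_false]
      split <;> rfl
    | cons nw rest =>
      rw [hq] at hdrop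
      have hlt : (pos.getD c 0).toNat < (rem.getD c []).length := by
        by_contra hge
        rw [List.drop_eq_nil_iff.mpr (by omega)] at hdrop
        exact List.cons_ne_nil nw rest hdrop.symm
      have hcond : pos.getD c 0 < ((rem.getD c []).length : Int) := by omega
      have hnxt : PySem.List.pyGetD (rem.getD c []) (pos.getD c 0) "" = nw := by
        rw [PySem.List.pyGetD_eq_getElem _ "" hk (by exact_mod_cast hcond)]
        have h2 : ((rem.getD c []).drop (pos.getD c 0).toNat).head? = some nw := by
          rw [hdrop]; rfl
        rw [List.head?_drop, List.getElem?_eq_getElem hlt] at h2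
        exact (Option.some_inj.mp h2)
      have hne : 0 < ws.length := by
        cases ws with
        | nil => simp at hq
        | cons a t => simp
      have hfa : pvFindNext c ws = some nw := by rw [pvFindNext_eq_head_filter, hq]; rfl
      obtain ⟨ws', hrw, hfilt⟩ := pvRemove_head_filter c ws nw rest hq
      have hA : pvChainA (n+1) c ws chain
          = pvChainA n (pvLast nw) ws' (chain ++ [nw]) := by
        simp [pvChainA, hne, hfa, hrw]
      have hB : pvChainB (n+1) c rem pos (chain.length : Int)
          = pvChainB n (pvLast nw) rem (pos.insert c (pos.getD c 0 + 1))
              ((chain.length : Int) + 1) := by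
        simp only [pvChainB, hcond, if_true, hnxt]
      rw [hA, hB]
      have hlen1 : ((chain ++ [nw]).length : Int) = (chain.length : Int) + 1 := by
        simp
      rw [← hlen1]
      apply ih
      · intro c'
        rw [PySem.Dict.getD_insert]
        split
        · omega
        · exact hpos c'
      · intro c'
        rw [PySem.Dict.getD_insert, hfilt c']
        by_cases hc : c' = c
        · subst hc
          rw [if_pos rfl, if_pos rfl]
          have ht : (pos.getD c' 0 + 1).toNat = (pos.getD c' 0).toNat + 1 := by omega
          rw [ht, ← List.drop_drop, hdrop]
          rfl
        · rw [if_neg hc, if_neg hc]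
          exact hinv c'

theorem pvBuckets_getD (words : List String) (c : Char) :
    (pvBuckets words).getD c [] = words.filter (fun w => pvHead w == c) := by
  have : pvBuckets words
      = (words.map (fun w => (pvHead w, w))).foldl
          (fun d p => d.modify p.1 [] (· ++ [p.2])) PySem.Dict.empty := by
    rw [List.foldl_map]; rfl
  rw [this, PySem.Dict.getD_foldl_modify_append]
  simp [List.filter_map, Function.comp_def]

theorem pvFilter_erase_pos {P : String → Bool} (w : String) (hw : P w = true) (ws : List String) :
    (ws.erase w).filter P = (ws.filter P).erase w := by
  induction ws with
  | nil => rfl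
  | cons x t ih =>
    by_cases hx : x = w
    · subst hx; simp [List.erase_cons_head, hw]
    · rw [List.erase_cons_tail (by simpa using hx)]
      by_cases hp : P x = true
      · rw [List.filter_cons_of_pos hp, List.filter_cons_of_pos hp,
          List.erase_cons_tail (by simpa using hx), ih]
      · rw [List.filter_cons_of_neg (by simpa using hp),
          List.filter_cons_of_neg (by simpa using hp), ih]

theorem pvFilter_erase_neg {P : String → Bool} (w : String) (hw : P w = false) (ws : List String) :
    (ws.erase w).filter P = ws.filter P := by
  induction ws with
  | nil => rfl
  | cons x t ih =>
    by_cases hx : x = w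
    · subst hx; simp [List.erase_cons_head, hw]
    · rw [List.erase_cons_tail (by simpa using hx)]
      simp [List.filter_cons, ih]

-- ===== VERDICT (by name: the statement is the Claim_ definition above) =====
theorem GetMaxChains_spec : Claim_equal_GetMaxChains := by
  intro words _ _
  unfold Spec_GetMaxChains GetMaxChains GetMaxChains_alt
  apply PySem.List.foldl_congr_mem
  intro best w hw
  have hws : (PySem.List.remove? words w).getD words = words.erase w := by
    rw [PySem.List.remove?_eq_some_erase words w hw]; rfl
  have hwf : w ∈ words.filter (fun x => pvHead x == pvHead w) := by
    simp [List.mem_filter, hw]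
  have hrem : (PySem.List.remove? ((pvBuckets words).getD (pvHead w) []) w).getD []
      = (words.filter (fun x => pvHead x == pvHead w)).erase w := by
    rw [pvBuckets_getD, PySem.List.remove?_eq_some_erase _ w hwf]; rfl
  have hsim := pvChain_sim words.length (pvLast w) (words.erase w) [w]
      ((pvBuckets words).insert (pvHead w)
        ((PySem.List.remove? ((pvBuckets words).getD (pvHead w) []) w).getD []))
      PySem.Dict.empty
      (by intro c'; simp [PySem.Dict.getD_empty])
      (by
        intro c'
        rw [PySem.Dict.getD_empty]
        simp only [Int.toNat_zero, List.drop_zero]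
        rw [PySem.Dict.getD_insert, hrem]
        by_cases hc : c' = pvHead w
        · subst hc
          rw [if_pos rfl, pvFilter_erase_pos w (by simp) words]
        · rw [if_neg hc, pvFilter_erase_neg w (by simp [Ne.symm hc]) words, pvBuckets_getD])
  simp only [hws, hsim, List.length_cons, List.length_nil]
  norm_num
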